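-- pv_equiv track=rewrite | github.com/ktl1111/chat | chat_instructor.py | convert
-- ===== SOURCE A (Python) =====
-- def convert(words):
-- 	new = []
-- 	sb = None #預設值設成無
-- 	for word in words:
-- 		if word == 'Allen':
-- 			sb = 'Allen'
-- 			continue
-- 		elif word == 'Tom':
-- 			sb = 'Tom'
-- 			continue
-- 		if sb: #如果sb有值
-- 			new.append(sb + ": " + word)
-- 	return new
-- ===== SOURCE B (Python) =====
-- def convert(words):
--     # Pass 1: segment into (speaker, buffer) blocks.
--     blocks = []
--     speaker = None
--     buf = []
--     for w in words:
--         if w == 'Allen' or w == 'Tom':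
--             if speaker is not None:
--                 blocks.append((speaker, buf))
--             speaker = w
--             buf = []
--         else:
--             buf.append(w)
--     if speaker is not None:
--         blocks.append((speaker, buf))
--     # Pass 2: render the blocks.
--     out = []
--     for sp, b in blocks:
--         for w in b:
--             out.append(sp + ": " + w)
--     return out
-- ===== Notes on version B (the rewrite author's own statement) =====
-- stated objective: alternative
-- what changed: B replaces A's single emit-as-you-go loop by a two-phase pipeline: one pass segments the words into (speaker, buffer) blocks, a second pass renders each block; words before the first speaker marker are dropped because no block is open.
import Mathlib
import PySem

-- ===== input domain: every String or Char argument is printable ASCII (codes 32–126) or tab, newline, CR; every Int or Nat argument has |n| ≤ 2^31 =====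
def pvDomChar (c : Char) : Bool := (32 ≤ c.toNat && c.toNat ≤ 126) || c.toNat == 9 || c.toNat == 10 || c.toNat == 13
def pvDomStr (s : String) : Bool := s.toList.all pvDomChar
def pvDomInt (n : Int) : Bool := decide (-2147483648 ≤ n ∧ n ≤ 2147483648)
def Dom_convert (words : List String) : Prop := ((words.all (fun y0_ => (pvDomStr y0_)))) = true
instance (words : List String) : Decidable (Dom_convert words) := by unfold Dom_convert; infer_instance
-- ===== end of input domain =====

-- B is a two-phase re-decomposition of A (segment into speaker blocks, then render); same values everywhere.

-- ===== PORT A =====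
-- A's for-loop over words with mutable state (new, sb), as a foldl; 'if sb:' is
-- exact as an Option match since sb is only None/'Allen'/'Tom' (never '').
def convertStep (st : List String × Option String) (word : String) : List String × Option String :=
  if word == "Allen" then (st.1, some "Allen")
  else if word == "Tom" then (st.1, some "Tom")
  else match st.2 with
    | some s => (st.1 ++ [s ++ ": " ++ word], some s)
    | none => st

def convert (words : List String) : List String :=
  (words.foldl convertStep ([], none)).1

-- ===== PORT B =====
-- Pass 1: segment into (speaker, buffer) blocks.
def collectBlocks : List String → Option String → List String → List (String × List String)
  | [], none, _ => []
  | [], some sp, buf => [(sp, buf)]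
  | w :: ws, sp, buf =>
    if w == "Allen" || w == "Tom" then
      (match sp with | some s => [(s, buf)] | none => []) ++ collectBlocks ws (some w) []
    else
      collectBlocks ws sp (buf ++ [w])

-- Pass 2: render the blocks.
def renderBlocks (blocks : List (String × List String)) : List String :=
  blocks.flatMap (fun bl => bl.2.map (fun w => bl.1 ++ ": " ++ w))

def convert_alt (words : List String) : List String :=
  renderBlocks (collectBlocks words none [])

-- ===== PRECONDITION & SPEC =====
def Spec_convert (words : List String) (out : List String) : Prop := out = convert_alt words
instance (words : List String) (out : List String) : Decidable (Spec_convert words out) := by unfold Spec_convert; infer_instance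

-- ===== CLAIM (what is proved, stated in full; the proofs are below) =====
def Claim_equal_convert : Prop := ∀ (words : List String), Dom_convert words → Spec_convert words (convert words)

-- ===== LEMMAS AND PROOFS =====

-- pure-recursive reading of A's loop (output tail from state sb)
def tailA : List String → Option String → List String
  | [], _ => []
  | w :: ws, sb =>
    if w == "Allen" then tailA ws (some "Allen")
    else if w == "Tom" then tailA ws (some "Tom")
    else match sb with
      | some s => (s ++ ": " ++ w) :: tailA ws (some s)
      | none => tailA ws none

lemma foldl_convertStep (ws : List String) :
    ∀ (acc : List String) (sb : Option String),
      (ws.foldl convertStep (acc, sb)).1 = acc ++ tailA ws sb := by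
  induction ws with
  | nil => intro acc sb; simp [tailA]
  | cons w ws ih =>
    intro acc sb
    by_cases hA : w == "Allen"
    · simp [List.foldl, convertStep, tailA, hA, ih]
    · by_cases hT : w == "Tom"
      · simp [List.foldl, convertStep, tailA, hA, hT, ih]
      · cases sb with
        | none => simp [List.foldl, convertStep, tailA, hA, hT, ih]
        | some s => simp [List.foldl, convertStep, tailA, hA, hT, ih]

def emitPending (sb : Option String) (buf : List String) : List String :=
  match sb with
  | some s => buf.map (fun w => s ++ ": " ++ w)
  | none => []

lemma render_collect (ws : List String) :
    ∀ (sb : Option String) (buf : List String),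
      renderBlocks (collectBlocks ws sb buf) = emitPending sb buf ++ tailA ws sb := by
  induction ws with
  | nil =>
    intro sb buf
    cases sb <;> simp [collectBlocks, renderBlocks, emitPending, tailA]
  | cons w ws ih =>
    intro sb buf
    by_cases hM : (w == "Allen" || w == "Tom") = true
    · have hrec : renderBlocks (collectBlocks (w :: ws) sb buf)
          = emitPending sb buf ++ renderBlocks (collectBlocks ws (some w) []) := by
        cases sb <;> simp [collectBlocks, hM, renderBlocks, emitPending]
      rw [hrec, ih]
      have ht : tailA (w :: ws) sb = tailA ws (some w) := by
        rcases Bool.or_eq_true_iff.mp hM with h | h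
        · have : w = "Allen" := by simpa using h
          subst this; simp [tailA]
        · have : w = "Tom" := by simpa using h
          subst this; simp [tailA]
      rw [ht]; simp [emitPending]
    · have hA : ¬ (w == "Allen") = true := by
        intro h; exact hM (by simp [h])
      have hT : ¬ (w == "Tom") = true := by
        intro h; exact hM (by simp [h])
      have hrec : collectBlocks (w :: ws) sb buf = collectBlocks ws sb (buf ++ [w]) := by
        simp [collectBlocks, hM]
      rw [hrec, ih]
      cases sb with
      | none => simp [emitPending, tailA, hA, hT]
      | some s => simp [emitPending, tailA, hA, hT]

-- ===== VERDICT (by name: the statement is the Claim_ definition above) =====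
theorem convert_spec : Claim_equal_convert := by
  intro words _
  unfold Spec_convert convert convert_alt
  rw [foldl_convertStep, render_collect]
  simp [emitPending]
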